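-- pv_equiv track=rewrite | github.com/ShivamXxd/DAA | Recursion_assignment/Practical19_Special_fibonacci.py | special_fibonacci
-- ===== SOURCE A (Python) =====
-- def special_fibonacci(a, b, n):
--     if n == 0:
--         return a
--     elif n == 1:
--         return b
--
--     prev1 = a
--     prev2 = b
--
--     for i in range(2, n + 1):
--         current = prev1 ^ prev2
--         prev1 = prev2
--         prev2 = current
--
--     return prev2
-- ===== SOURCE B (Python) =====
-- def special_fibonacci(a, b, n):
--     # Closed form: the XOR recurrence is periodic with period 3 (a, b, a^b, a, b, ...).
--     if n == 0:
--         return a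
--     if n < 2:
--         return b
--     r = n % 3
--     if r == 0:
--         return a
--     if r == 1:
--         return b
--     return a ^ b
-- ===== Notes on version B (the rewrite author's own statement) =====
-- stated objective: faster
-- what changed: Replaced the O(n) XOR-iteration loop by the O(1) closed form exploiting that the sequence a, b, a^b repeats with period 3, selecting by n % 3.
import Mathlib
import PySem

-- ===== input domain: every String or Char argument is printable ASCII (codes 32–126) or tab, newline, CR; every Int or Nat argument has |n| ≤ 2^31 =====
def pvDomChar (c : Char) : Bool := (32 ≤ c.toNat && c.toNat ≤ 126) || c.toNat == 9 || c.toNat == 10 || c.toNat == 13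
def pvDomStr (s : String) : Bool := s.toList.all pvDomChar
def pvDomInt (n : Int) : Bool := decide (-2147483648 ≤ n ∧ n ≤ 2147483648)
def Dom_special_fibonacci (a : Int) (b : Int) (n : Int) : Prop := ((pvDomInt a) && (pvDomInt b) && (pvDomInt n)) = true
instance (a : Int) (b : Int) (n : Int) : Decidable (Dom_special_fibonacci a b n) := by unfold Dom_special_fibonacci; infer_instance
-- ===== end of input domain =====

-- B replaces A's O(n) XOR-iteration loop by the O(1) period-3 closed form (a, b, a^b by n % 3).


-- ===== PORT A =====
def special_fibonacci (a : Int) (b : Int) (n : Int) : Int :=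
  if n = 0 then a
  else if n = 1 then b
  else
    ((PySem.List.pyRange 2 (n+1) 1).foldl
      (fun (s : Int × Int) _ => (s.2, PySem.Int.bxor s.1 s.2)) (a, b)).2

-- ===== PORT B =====
def special_fibonacci_alt (a : Int) (b : Int) (n : Int) : Int :=
  if n = 0 then a
  else if n < 2 then b
  else
    let r := PySem.Int.mod n 3
    if r = 0 then a
    else if r = 1 then b
    else PySem.Int.bxor a b

-- ===== PRECONDITION & SPEC =====
def Spec_special_fibonacci (a : Int) (b : Int) (n : Int) (out : Int) : Prop := out = special_fibonacci_alt a b n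
instance (a : Int) (b : Int) (n : Int) (out : Int) : Decidable (Spec_special_fibonacci a b n out) := by unfold Spec_special_fibonacci; infer_instance

-- ===== CLAIM (what is proved, stated in full; the proofs are below) =====
def Claim_equal_special_fibonacci : Prop := ∀ (a : Int) (b : Int) (n : Int), Dom_special_fibonacci a b n → Spec_special_fibonacci a b n (special_fibonacci a b n)

-- ===== LEMMAS AND PROOFS =====

-- the loop body of A, as a function of the state pair
def pvStep (s : Int × Int) : Int × Int := (s.2, PySem.Int.bxor s.1 s.2)

-- XOR cancellation on Python ints: (p ^ q) ^ q = p
theorem pv_bxor_cancel (p q : Int) : PySem.Int.bxor (PySem.Int.bxor p q) q = p := by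
  unfold PySem.Int.bxor
  split_ifs <;> simp_all [Nat.xor_xor_cancel_right] <;> omega

theorem pv_step3 (s : Int × Int) : pvStep (pvStep (pvStep s)) = s := by
  obtain ⟨p, q⟩ := s
  simp only [pvStep]
  have h1 : PySem.Int.bxor q (PySem.Int.bxor p q) = p := by
    rw [PySem.Int.bxor_comm, pv_bxor_cancel]
  have h2 : PySem.Int.bxor (PySem.Int.bxor p q) p = q := by
    rw [PySem.Int.bxor_comm p q, pv_bxor_cancel]
  simp [h1, h2]

theorem pv_foldl_const (l : List Int) (s : Int × Int) :
    l.foldl (fun (s : Int × Int) _ => (s.2, PySem.Int.bxor s.1 s.2)) s = pvStep^[l.length] s := by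
  induction l generalizing s with
  | nil => rfl
  | cons x xs ih => simp [List.foldl_cons, ih, Function.iterate_succ_apply, pvStep]

theorem pv_iter_mod (m : Nat) (s : Int × Int) : pvStep^[m] s = pvStep^[m % 3] s := by
  induction m using Nat.strong_induction_on with
  | _ m ih =>
    by_cases h : m < 3
    · rw [Nat.mod_eq_of_lt h]
    · have hm : m = (m - 3) + 3 := by omega
      rw [hm, Function.iterate_add_apply]
      have h3 : pvStep^[3] s = s := by
        simp [Function.iterate_succ_apply, pv_step3]
      rw [h3, ih (m - 3) (by omega)]
      congr 1
      omega

-- ===== VERDICT (by name: the statement is the Claim_ definition above) =====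
theorem special_fibonacci_spec : Claim_equal_special_fibonacci := by
  intro a b n _
  unfold Spec_special_fibonacci special_fibonacci special_fibonacci_alt
  by_cases h0 : n = 0
  · simp [h0]
  by_cases h1 : n = 1
  · simp [h1]
  simp only [h0, h1, if_false]
  by_cases h2 : n < 2
  · -- negative n: the loop range is empty, both return b
    rw [PySem.List.pyRange_one_eq_nil (by omega)]
    simp [h2]
  · -- n ≥ 2: fold = iterate, then period 3
    rw [pv_foldl_const, PySem.List.length_pyRange_one, pv_iter_mod]
    have hn2 : (2:Int) ≤ n := by omega
    have hmod : PySem.Int.mod n 3 = n % 3 := PySem.Int.mod_eq_emod_of_pos (by omega)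
    set k := (n + 1 - 2).toNat with hk
    have hkn : (k : Int) = n - 1 := by omega
    have h3 : k % 3 = 0 ∨ k % 3 = 1 ∨ k % 3 = 2 := by omega
    rcases h3 with hr | hr | hr
    · have hn3 : n % 3 = 1 := by omega
      simp [hr, hn3, h2]
    · have hn3 : n % 3 = 2 := by omega
      simp [hr, hn3, h2, pvStep]
    · have hn3 : n % 3 = 0 := by omega
      have h1' : PySem.Int.bxor b (PySem.Int.bxor a b) = a := by
        rw [PySem.Int.bxor_comm, pv_bxor_cancel]
      simp [hr, hn3, h2, pvStep, Function.iterate_succ_apply, h1']
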